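-- pv_equiv track=rewrite | github.com/IgrMd/yandex-algos-training | Тренировки по алгоритмам 3.0/Дивизион B/Тема 3. Динамическое программирование с одним параметром/21.py | sequence_count
-- ===== SOURCE A (Python) =====
-- def sequence_count(N):
--     n = 8 if N <= 7 else N + 1
--     dp = [0] * n
--     dp[1] = 2
--     dp[2] = 4
--     dp[3] = 7
--     for i in range(4, n):
--         if i <= 6:
--             dp[i] = dp[i - 1] * 2 - 2 ** (i - 4)
--         else:
--             dp[i] = dp[i - 1] * 2 - dp[i - 4]
--     return dp[N]
-- ===== SOURCE B (Python) =====
-- def sequence_count(N):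
--     # dp[i] of the original recurrence equals tribonacci T(i+2), T(0)=0, T(1)=T(2)=1
--     if N <= 0:
--         return 0
--     a, b, c = 0, 1, 1
--     for _ in range(N):
--         a, b, c = b, c, a + b + c
--     return c
-- ===== Notes on version B (the rewrite author's own statement) =====
-- stated objective: simpler
-- what changed: Replaced the O(N)-array DP with its branch at i<=6 and the 2**(i-4) correction term by a three-variable tribonacci loop (dp[i] equals tribonacci(i+2)), using O(1) memory and no array, no branch, no powers.
-- intended difference: For -7 <= N <= -1 A's negative-index wraparound accidentally returns an entry of its 8-element dp table (e.g. A(-1) is 81); B returns 0, the intended count for a non-positive length. — e.g. on sequence_count(-1): A returns 81, B returns 0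
import Mathlib
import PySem

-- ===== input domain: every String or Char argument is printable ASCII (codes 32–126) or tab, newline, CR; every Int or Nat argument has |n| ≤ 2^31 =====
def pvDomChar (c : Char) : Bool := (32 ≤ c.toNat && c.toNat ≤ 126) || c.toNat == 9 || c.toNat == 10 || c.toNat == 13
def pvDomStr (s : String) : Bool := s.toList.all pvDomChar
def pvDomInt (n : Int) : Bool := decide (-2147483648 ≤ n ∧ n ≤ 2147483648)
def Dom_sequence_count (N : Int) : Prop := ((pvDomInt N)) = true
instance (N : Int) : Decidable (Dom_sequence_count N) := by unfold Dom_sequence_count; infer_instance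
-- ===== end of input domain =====

-- B replaces A's array DP (with its i≤6 branch and 2^(i-4) term) by a three-variable
-- tribonacci loop; on -7 ≤ N ≤ -1 A's negative-index wraparound value is replaced by 0
-- (see D_); where A raises IndexError (N < -8, outside Pre_) B returns 0.

-- ===== PORT A =====
-- loop body of A's 'for i in range(4, n)', kept as a named helper for the fold
def stepA (dp : List Int) (i : Int) : List Int :=
  if i ≤ 6 then
    PySem.List.pySetD dp i (PySem.List.pyGetD dp (i - 1) 0 * 2 - 2 ^ (i - 4).toNat)
  else
    PySem.List.pySetD dp i (PySem.List.pyGetD dp (i - 1) 0 * 2 - PySem.List.pyGetD dp (i - 4) 0)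

def sequence_count (N : Int) : Int :=
  let n : Int := if N ≤ 7 then 8 else N + 1
  let dp : List Int := List.replicate n.toNat 0
  let dp := PySem.List.pySetD dp 1 2
  let dp := PySem.List.pySetD dp 2 4
  let dp := PySem.List.pySetD dp 3 7
  let dp := (PySem.List.pyRange 4 n 1).foldl stepA dp
  PySem.List.pyGetD dp N 0

-- ===== PORT B =====
def sequence_count_alt (N : Int) : Int :=
  if N ≤ 0 then 0
  else
    ((List.range N.toNat).foldl
      (fun (t : Int × Int × Int) _ => (t.2.1, t.2.2, t.1 + t.2.1 + t.2.2)) (0, 1, 1)).2.2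

-- ===== PRECONDITION & SPEC =====
-- Pre_ excludes only N < -8, where A raises IndexError (negative index past the 8-element dp).
def Pre_sequence_count (N : Int) : Prop := -8 ≤ N
instance (N : Int) : Decidable (Pre_sequence_count N) := by unfold Pre_sequence_count; infer_instance
def pvWitness_sequence_count : Int := 5

-- For -7 ≤ N ≤ -1 A's negative-index wraparound accidentally returns dp[8+N]
-- (a tribonacci value); B returns 0, the intended count for a non-positive length.
def D_sequence_count (N : Int) : Prop := -7 ≤ N ∧ N ≤ -1
instance (N : Int) : Decidable (D_sequence_count N) := by unfold D_sequence_count; infer_instance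

def Spec_sequence_count (N : Int) (out : Int) : Prop := ¬ D_sequence_count N → out = sequence_count_alt N
instance (N : Int) (out : Int) : Decidable (Spec_sequence_count N out) := by unfold Spec_sequence_count; infer_instance

def pvDiffWitness_sequence_count : Int := -1
def pvDiffWitnessOut_sequence_count : Int × Int := (81, 0)

-- ===== CLAIM (what is proved, stated in full; the proofs are below) =====
def Claim_unchanged_sequence_count : Prop := ∀ (N : Int), Dom_sequence_count N → Pre_sequence_count N → Spec_sequence_count N (sequence_count N)
def Claim_changed_sequence_count : Prop := Dom_sequence_count (pvDiffWitness_sequence_count) ∧ Pre_sequence_count (pvDiffWitness_sequence_count) ∧ D_sequence_count (pvDiffWitness_sequence_count) ∧ sequence_count (pvDiffWitness_sequence_count) = pvDiffWitnessOut_sequence_count.1 ∧ sequence_count_alt (pvDiffWitness_sequence_count) = pvDiffWitnessOut_sequence_count.2 ∧ pvDiffWitnessOut_sequence_count.1 ≠ pvDiffWitnessOut_sequence_count.2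
def Claim_exact_sequence_count : Prop := ∀ (N : Int), Dom_sequence_count N → Pre_sequence_count N → D_sequence_count N → sequence_count N ≠ sequence_count_alt N

-- ===== LEMMAS AND PROOFS =====

-- tribonacci: T 0 = 0, T 1 = T 2 = 1, T (n+3) = T n + T (n+1) + T (n+2)
def trib : Nat → Int
  | 0 => 0
  | 1 => 1
  | 2 => 1
  | n + 3 => trib n + trib (n + 1) + trib (n + 2)

-- the value A's recurrence stores at dp[i]
def dpv : Nat → Int
  | 0 => 0
  | 1 => 2
  | 2 => 4
  | 3 => 7
  | n + 4 => if n + 4 ≤ 6 then dpv (n + 3) * 2 - 2 ^ n else dpv (n + 3) * 2 - dpv n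

lemma getD_eq_pyGetD (xs : List Int) (i : Int) (h0 : 0 ≤ i) (h1 : i < xs.length) :
    PySem.List.pyGetD xs i 0 = xs.getD i.toNat 0 := by
  rw [PySem.List.pyGetD_eq_getElem xs 0 h0 (by exact_mod_cast h1),
      List.getD_eq_getElem _ _ (by omega)]

lemma altLoop (k : Nat) :
    (List.range k).foldl
      (fun (t : Int × Int × Int) _ => (t.2.1, t.2.2, t.1 + t.2.1 + t.2.2)) (0, 1, 1)
      = (trib k, trib (k + 1), trib (k + 2)) := by
  induction k with
  | zero => rfl
  | succ k ih => rw [List.range_succ, List.foldl_append, ih]; simp [trib]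

lemma dpv_eq_trib : ∀ n : Nat, dpv (n + 1) = trib (n + 3) := by
  intro n
  induction n using Nat.strong_induction_on with
  | _ n ih =>
    match n with
    | 0 => decide
    | 1 => decide
    | 2 => decide
    | 3 => decide
    | 4 => decide
    | 5 => decide
    | m + 6 =>
      have h1 : dpv (m + 6) = trib (m + 8) := ih (m + 5) (by omega)
      have h2 : dpv (m + 3) = trib (m + 5) := ih (m + 2) (by omega)
      have e1 : trib (m + 9) = trib (m + 6) + trib (m + 7) + trib (m + 8) := rfl
      have e2 : trib (m + 8) = trib (m + 5) + trib (m + 6) + trib (m + 7) := rfl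
      show dpv (m + 3 + 4) = trib (m + 9)
      rw [dpv]
      simp only [show ¬ (m + 3 + 4 ≤ 6) by omega, if_false]
      rw [show m + 3 + 3 = m + 6 from rfl, h1, h2]
      linarith

lemma sequence_count_alt_pos (N : Int) (h : 0 < N) :
    sequence_count_alt N = trib (N.toNat + 2) := by
  unfold sequence_count_alt
  rw [if_neg (by omega), altLoop]

-- loop invariant for A's fold: after processing range(4, m) the array holds dpv below m, 0 above
lemma loopA_inv (n : Int) (hn : 8 ≤ n) :
    ∀ m : Int, 4 ≤ m → m ≤ n →
    (((PySem.List.pyRange 4 m 1).foldl stepA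
        (PySem.List.pySetD (PySem.List.pySetD (PySem.List.pySetD
          (List.replicate n.toNat (0 : Int)) 1 2) 2 4) 3 7)).length = n.toNat
     ∧ ∀ i : Nat,
        ((PySem.List.pyRange 4 m 1).foldl stepA
          (PySem.List.pySetD (PySem.List.pySetD (PySem.List.pySetD
            (List.replicate n.toNat (0 : Int)) 1 2) 2 4) 3 7)).getD i 0
        = if i < m.toNat then dpv i else 0) := by
  intro m hm4
  induction m, hm4 using Int.le_induction with
  | base =>
    intro _
    rw [PySem.List.pyRange_one_eq_nil (by omega), List.foldl_nil]
    rw [PySem.List.pySetD_of_nonneg _ _ (by omega), PySem.List.pySetD_of_nonneg _ _ (by omega),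
        PySem.List.pySetD_of_nonneg _ _ (by omega)]
    constructor
    · simp
    · intro i
      have h8 : 8 ≤ n.toNat := by omega
      by_cases h4 : i < 4
      · rw [if_pos (by omega)]
        interval_cases i <;>
          simp [List.getD, dpv,
            show (0:Nat) < n.toNat by omega, show (1:Nat) < n.toNat by omega,
            show (2:Nat) < n.toNat by omega, show (3:Nat) < n.toNat by omega]
      · rw [if_neg (by omega)]
        have e1 : (Int.toNat 1) ≠ i := by omega
        have e2 : (Int.toNat 2) ≠ i := by omega
        have e3 : (Int.toNat 3) ≠ i := by omega
        simp only [List.getD, List.getElem?_set_ne e3, List.getElem?_set_ne e2,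
          List.getElem?_set_ne e1, List.getElem?_replicate]
        split <;> rfl
  | succ m hm ih =>
    intro hmn
    obtain ⟨hlen, hget⟩ := ih (by omega)
    rw [PySem.List.pyRange_one_succ_right (by omega), List.foldl_append, List.foldl_cons,
        List.foldl_nil]
    set Lm := (PySem.List.pyRange 4 m 1).foldl stepA
        (PySem.List.pySetD (PySem.List.pySetD (PySem.List.pySetD
          (List.replicate n.toNat (0 : Int)) 1 2) 2 4) 3 7) with hLm
    have hmlen : (m.toNat) < Lm.length := by omega
    have hread1 : PySem.List.pyGetD Lm (m - 1) 0 = dpv (m.toNat - 1) := by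
      rw [getD_eq_pyGetD Lm (m-1) (by omega) (by omega), hget]
      rw [if_pos (by omega)]
      congr 1; omega
    have hval : stepA Lm m = Lm.set m.toNat (dpv m.toNat) := by
      unfold stepA
      by_cases h6 : m ≤ 6
      · rw [if_pos h6, PySem.List.pySetD_of_nonneg _ _ (by omega), hread1]
        congr 1
        have : m.toNat = (m.toNat - 4) + 4 := by omega
        rw [this, dpv, if_pos (by omega)]
        congr 2
        omega
      · rw [if_neg h6, PySem.List.pySetD_of_nonneg _ _ (by omega), hread1]
        have hread4 : PySem.List.pyGetD Lm (m - 4) 0 = dpv (m.toNat - 4) := by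
          rw [getD_eq_pyGetD Lm (m-4) (by omega) (by omega), hget, if_pos (by omega)]
          congr 1; omega
        rw [hread4]
        congr 1
        have : m.toNat = (m.toNat - 4) + 4 := by omega
        rw [this, dpv, if_neg (by omega)]
        congr 2
    rw [hval]
    constructor
    · simp [hlen]
    · intro i
      rcases eq_or_ne i m.toNat with h | h
      · subst h
        rw [List.getD_eq_getElem _ _ (by simpa using hmlen), List.getElem_set_self]
        rw [if_pos (by omega)]
      · have : (Lm.set m.toNat (dpv m.toNat)).getD i 0 = Lm.getD i 0 := by
          simp [List.getD, List.getElem?_set_ne (by omega : m.toNat ≠ i)]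
        rw [this, hget]
        by_cases hi : i < m.toNat
        · rw [if_pos hi, if_pos (by omega)]
        · rw [if_neg hi, if_neg (by omega)]

lemma A_val (N : Int) (h0 : 0 ≤ N) : sequence_count N = dpv N.toNat := by
  have hu : sequence_count N =
      PySem.List.pyGetD ((PySem.List.pyRange 4 (if N ≤ 7 then (8:Int) else N + 1) 1).foldl stepA
        (PySem.List.pySetD (PySem.List.pySetD (PySem.List.pySetD
          (List.replicate (if N ≤ 7 then (8:Int) else N + 1).toNat (0 : Int)) 1 2) 2 4) 3 7)) N 0 := rfl
  have hn8 : (8:Int) ≤ (if N ≤ 7 then (8:Int) else N + 1) := by split <;> omega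
  have hNn : N < (if N ≤ 7 then (8:Int) else N + 1) := by split <;> omega
  obtain ⟨hlen, hget⟩ := loopA_inv _ hn8 _ (by omega) le_rfl
  rw [hu, getD_eq_pyGetD _ _ h0 (by rw [hlen]; omega), hget, if_pos (by omega)]

-- ===== VERDICT (by name: the statement is the Claim_ definition above) =====
theorem sequence_count_spec : Claim_unchanged_sequence_count := by
  intro N _ hPre hD
  unfold Pre_sequence_count at hPre
  unfold D_sequence_count at hD
  have hcase : N = -8 ∨ 0 ≤ N := by omega
  rcases hcase with h | h0
  · subst h; decide
  · rw [A_val N h0]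
    rcases eq_or_lt_of_le h0 with h | hpos
    · rw [← h]; decide
    · rw [sequence_count_alt_pos N hpos]
      obtain ⟨k, hk⟩ : ∃ k, N.toNat = k + 1 := ⟨N.toNat - 1, by omega⟩
      rw [hk, dpv_eq_trib]

theorem sequence_count_changed : Claim_changed_sequence_count := by
  unfold Claim_changed_sequence_count; decide

theorem sequence_count_tight : Claim_exact_sequence_count := by
  intro N _ _ hD
  have : N = -7 ∨ N = -6 ∨ N = -5 ∨ N = -4 ∨ N = -3 ∨ N = -2 ∨ N = -1 := by
    rcases hD with ⟨h1, h2⟩; omega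
  rcases this with h | h | h | h | h | h | h <;> subst h <;> decide
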